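-- pv_equiv track=rewrite | github.com/mummi-framework/mummi-ras | mummi_ras/scripts/update_wf_chkpt.py | _add_to_running_dict
-- ===== SOURCE A (Python) =====
-- from typing import List, Dict
--
-- def _add_to_running_dict(original_dict: Dict[int, List[str]], add_list: List[str]) -> Dict[int, List[str]]:
--
--     current_patches = [item[0] for item in original_dict.values() if item]
--
--     i = 0
--     for item in add_list:
--         if item not in current_patches:
--             while i in original_dict: i += 1
--             original_dict[i] = [item]
--             i += 1
--     return original_dict
-- ===== SOURCE B (Python) =====
-- def _add_to_running_dict(original_dict, add_list):
--     current = {v[0] for v in original_dict.values() if v}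
--     to_add = [it for it in add_list if it not in current]
--     taken = sorted({k for k in original_dict if k >= 0})
--     free = []
--     c = j = 0
--     while len(free) < len(to_add):
--         if j < len(taken) and taken[j] == c:
--             j += 1
--         else:
--             free.append(c)
--         c += 1
--     for k, it in zip(free, to_add):
--         original_dict[k] = [it]
--     return original_dict
-- ===== Notes on version B (the rewrite author's own statement) =====
-- stated objective: faster
-- what changed: A interleaves duplicate filtering with an upward membership probe of the mutating dict for each new item; B first filters add_list against a set of current first items, then allocates all fresh keys at once by sorting the nonnegative existing keys and running a two-pointer merge of that sorted list against the integer counter, finally zipping keys with items - no per-item membership scan remains.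
import Mathlib
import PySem

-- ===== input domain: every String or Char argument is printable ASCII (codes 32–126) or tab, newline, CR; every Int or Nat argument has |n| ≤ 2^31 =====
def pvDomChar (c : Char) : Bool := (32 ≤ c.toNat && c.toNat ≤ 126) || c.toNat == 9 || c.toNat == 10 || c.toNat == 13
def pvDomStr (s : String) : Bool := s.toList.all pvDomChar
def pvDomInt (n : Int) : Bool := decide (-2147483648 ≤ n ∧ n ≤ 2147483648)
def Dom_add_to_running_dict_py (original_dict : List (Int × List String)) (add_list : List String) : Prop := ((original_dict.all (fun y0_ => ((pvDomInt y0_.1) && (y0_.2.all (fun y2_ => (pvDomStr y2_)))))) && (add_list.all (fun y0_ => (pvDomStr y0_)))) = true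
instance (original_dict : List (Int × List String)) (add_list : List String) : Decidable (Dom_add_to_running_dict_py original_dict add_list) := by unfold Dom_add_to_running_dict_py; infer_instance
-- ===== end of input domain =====

-- B replaces A's per-item upward membership probe of the mutating dict by a one-time
-- sort of the nonnegative existing keys plus a two-pointer merge that enumerates all the
-- fresh keys at once, zipped with the filtered new items; both Pythons mutate
-- original_dict in place, and the equivalence proved is about the returned dict's items.
-- ===== PORT A =====
-- while i in original_dict: i += 1   (terminates: each step consumes a key ≥ i)
theorem pvFilter_ge_succ_lt (keys : List Int) (i : Int) (h : i ∈ keys) :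
    (keys.filter (fun k => i + 1 ≤ k)).length < (keys.filter (fun k => i ≤ k)).length := by
  induction keys with
  | nil => cases h
  | cons k ks ih =>
    rcases List.mem_cons.mp h with heq | hk
    · simp only [List.filter_cons, ← heq]
      have h1 : (decide (i ≤ i)) = true := by simp
      have h2 : (decide (i + 1 ≤ i)) = false := by simp
      simp only [h1, h2, if_true, Bool.false_eq_true, if_false, List.length_cons]
      have : (ks.filter (fun j => i + 1 ≤ j)).length ≤ (ks.filter (fun j => i ≤ j)).length := by
        apply List.Sublist.length_le
        apply List.monotone_filter_right
        intro x hx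
        simp at hx ⊢; omega
      omega
    · simp only [List.filter_cons]
      by_cases h1 : i + 1 ≤ k
      · have h2 : i ≤ k := by omega
        simp only [h1, h2, decide_true]
        exact Nat.succ_lt_succ (ih hk)
      · by_cases h2 : i ≤ k
        · simp only [h1, h2, decide_true, decide_false]
          exact Nat.lt_succ_of_lt (ih hk)
        · simp only [h1, h2, decide_false]
          exact ih hk

def pvFindFree (d : PySem.Dict Int (List String)) (i : Int) : Int :=
  if h : d.contains i then pvFindFree d (i + 1) else i
termination_by (d.keys.filter (fun k => i ≤ k)).length
decreasing_by
  exact pvFilter_ge_succ_lt d.keys i ((PySem.Dict.contains_iff_mem_keys d i).mp h)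

-- the for-loop over add_list, mutating the dict
def pvLoopA (cur : List String) (d : PySem.Dict Int (List String)) (i : Int) :
    List String → PySem.Dict Int (List String)
  | [] => d
  | item :: rest =>
      if cur.contains item then pvLoopA cur d i rest
      else
        let j := pvFindFree d i
        pvLoopA cur (d.insert j [item]) (j + 1) rest

def add_to_running_dict_py (original_dict : List (Int × List String)) (add_list : List String) : List (Int × List String) :=
  let d0 := PySem.Dict.mk original_dict
  let current_patches := (d0.values.filter (fun v => !v.isEmpty)).map (fun v => v.headI)
  (pvLoopA current_patches d0 0 add_list).items

-- ===== PORT B =====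
-- while len(free) < len(to_add): two-pointer merge of the counter c against sorted taken keys
def pvFreeKeys (need : Nat) (taken : List Int) (c : Int) (j : Nat) (free : List Int) : List Int :=
  if free.length < need then
    if j < taken.length ∧ taken[j]! = c then
      pvFreeKeys need taken (c + 1) (j + 1) free
    else
      pvFreeKeys need taken (c + 1) j (free ++ [c])
  else free
termination_by (need - free.length) + (taken.length - j)
decreasing_by
  · omega
  · simp only [List.length_append, List.length_singleton]; omega

def add_to_running_dict_py_alt (original_dict : List (Int × List String)) (add_list : List String) : List (Int × List String) :=
  let current := PySem.Set.ofList
    (((original_dict.map (fun p => p.2)).filter (fun v => !v.isEmpty)).map (fun v => v.headI))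
  let to_add := add_list.filter (fun it => !current.contains it)
  let taken := PySem.List.sorted
    (PySem.Set.ofList ((original_dict.map (fun p => p.1)).filter (fun k => decide (0 ≤ k))))
    (fun x => x) false
  let free := pvFreeKeys to_add.length taken 0 0 []
  ((free.zip to_add).foldl (fun d p => d.insert p.1 [p.2]) (PySem.Dict.mk original_dict)).items

-- ===== PRECONDITION & SPEC =====  (A is total: no Pre_)
def Spec_add_to_running_dict_py (original_dict : List (Int × List String)) (add_list : List String) (out : List (Int × List String)) : Prop := out = add_to_running_dict_py_alt original_dict add_list
instance (original_dict : List (Int × List String)) (add_list : List String) (out : List (Int × List String)) : Decidable (Spec_add_to_running_dict_py original_dict add_list out) := by unfold Spec_add_to_running_dict_py; infer_instance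

-- ===== CLAIM (what is proved, stated in full; the proofs are below) =====
def Claim_equal_add_to_running_dict_py : Prop := ∀ (original_dict : List (Int × List String)) (add_list : List String), Dom_add_to_running_dict_py original_dict add_list → Spec_add_to_running_dict_py original_dict add_list (add_to_running_dict_py original_dict add_list)

-- ===== LEMMAS AND PROOFS =====
-- the smallest integer ≥ i not in `existing` (reference form for both sides)
def pvNextFree (existing : List Int) (i : Int) : Int :=
  if h : i ∈ existing then pvNextFree existing (i + 1) else i
termination_by (existing.filter (fun k => i ≤ k)).length
decreasing_by exact pvFilter_ge_succ_lt existing i h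

-- the first n free integers ≥ i
def pvFreeSeq (existing : List Int) (i : Int) : Nat → List Int
  | 0 => []
  | n + 1 => pvNextFree existing i :: pvFreeSeq existing (pvNextFree existing i + 1) n

-- reference form of A's allocation loop
def pvAllocB (existing : List Int) (i : Int) : List String → List (Int × List String)
  | [] => []
  | item :: rest =>
      let k := pvNextFree existing i
      (k, [item]) :: pvAllocB existing (k + 1) rest

theorem pvNextFree_ge (existing : List Int) (i : Int) : i ≤ pvNextFree existing i := by
  fun_induction pvNextFree with
  | case1 i h ih => omega
  | case2 i h => omega

theorem pvNextFree_not_mem (existing : List Int) (i : Int) : pvNextFree existing i ∉ existing := by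
  fun_induction pvNextFree with
  | case1 i h ih => exact ih
  | case2 i h => exact h

theorem pvFindFree_eq (od extra : List (Int × List String)) (i : Int)
    (hx : ∀ k ∈ extra.map (fun p => p.1), k < i) :
    pvFindFree (PySem.Dict.mk (od ++ extra)) i
      = pvNextFree (PySem.Set.ofList (od.map (fun p => p.1))) i := by
  fun_induction pvNextFree (PySem.Set.ofList (od.map (fun p => p.1))) i with
  | case1 i h ih =>
    rw [pvFindFree, dif_pos]
    · exact ih (fun k hk => by have := hx k hk; omega)
    · rw [PySem.Dict.contains_iff_mem_keys]
      simp only [PySem.Dict.keys_mk, List.map_append, List.mem_append]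
      exact Or.inl ((PySem.Set.mem_ofList _ _).mp h)
  | case2 i h =>
    rw [pvFindFree, dif_neg]
    rw [PySem.Dict.contains_iff_mem_keys]
    simp only [PySem.Dict.keys_mk, List.map_append, List.mem_append]
    rintro (h1 | h2)
    · exact h ((PySem.Set.mem_ofList _ _).mpr h1)
    · have := hx i h2; omega

theorem pvLoopA_eq (cur : List String) (od : List (Int × List String)) :
    ∀ (items : List String) (extra : List (Int × List String)) (i : Int),
    (∀ k ∈ extra.map (fun p => p.1), k < i) →
    (pvLoopA cur (PySem.Dict.mk (od ++ extra)) i items).items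
      = od ++ extra ++ pvAllocB (PySem.Set.ofList (od.map (fun p => p.1))) i
          (items.filter (fun it => !cur.contains it)) := by
  intro items
  induction items with
  | nil => intro extra i hx; simp [pvLoopA, pvAllocB]
  | cons item rest ih =>
    intro extra i hx
    by_cases hc : cur.contains item
    · simp only [pvLoopA, hc, if_true, List.filter_cons, Bool.not_true,
        Bool.false_eq_true, if_false]
      exact ih extra i hx
    · have hj := pvFindFree_eq od extra i hx
      have hge := pvNextFree_ge (PySem.Set.ofList (od.map (fun p => p.1))) i
      have hnm := pvNextFree_not_mem (PySem.Set.ofList (od.map (fun p => p.1))) i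
      set j := pvNextFree (PySem.Set.ofList (od.map (fun p => p.1))) i with hjdef
      have hcon : (PySem.Dict.mk (od ++ extra)).contains j = false := by
        rw [← Bool.not_eq_true, PySem.Dict.contains_iff_mem_keys]
        simp only [PySem.Dict.keys_mk, List.map_append, List.mem_append]
        rintro (h1 | h2)
        · exact hnm ((PySem.Set.mem_ofList _ _).mpr h1)
        · have := hx j h2; omega
      have hins : (PySem.Dict.mk (od ++ extra)).insert j [item]
          = PySem.Dict.mk (od ++ (extra ++ [(j, [item])])) := by
        apply PySem.Dict.ext
        rw [PySem.Dict.items_insert_of_not_contains _ _ hcon]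
        simp
      simp only [pvLoopA, hc, Bool.false_eq_true, if_false, hj, hins]
      rw [ih (extra ++ [(j, [item])]) (j + 1) (by
        intro k hk
        simp only [List.map_append, List.mem_append] at hk
        rcases hk with h1 | h2
        · have := hx k h1; omega
        · simp at h2; omega)]
      simp only [List.filter_cons, hc, Bool.not_false, if_true, pvAllocB, ← hjdef]
      simp

-- skipping a member of `existing` does not change the free sequence
theorem pvFreeSeq_mem (existing : List Int) (c : Int) (h : c ∈ existing) (n : Nat) :
    pvFreeSeq existing c n = pvFreeSeq existing (c + 1) n := by
  cases n with
  | zero => rfl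
  | succ m =>
    have hnf : pvNextFree existing c = pvNextFree existing (c + 1) := by
      rw [pvNextFree, dif_pos h]
    simp [pvFreeSeq, hnf]

-- the two-pointer merge computes exactly the free sequence of the sorted key list
theorem pvFreeKeys_eq (need : Nat) (taken : List Int) (c : Int) (j : Nat) (free : List Int)
    (hs : taken.Pairwise (· < ·)) :
    (∀ x ∈ taken.take j, x < c) → (∀ x ∈ taken.drop j, c ≤ x) →
    pvFreeKeys need taken c j free = free ++ pvFreeSeq taken c (need - free.length) := by
  fun_induction pvFreeKeys need taken c j free with
  | case1 c j free hlt hcond ih =>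
    intro htake hdrop
    obtain ⟨hjlen, hjc⟩ := hcond
    rw [getElem!_pos taken j hjlen] at hjc
    have hdropj : taken.drop j = taken[j] :: taken.drop (j + 1) :=
      List.drop_eq_getElem_cons hjlen
    have hpdrop : (taken.drop j).Pairwise (· < ·) := hs.drop
    rw [hdropj] at hpdrop
    have hgt : ∀ x ∈ taken.drop (j + 1), taken[j] < x :=
      (List.pairwise_cons.mp hpdrop).1
    rw [ih (by
        intro x hx
        rw [List.take_add_one, List.getElem?_eq_getElem hjlen] at hx
        simp only [Option.toList_some, List.mem_append, List.mem_singleton] at hx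
        rcases hx with hx | hx
        · have := htake x hx; omega
        · subst hx; omega)
      (by intro x hx; have := hgt x hx; omega)]
    congr 1
    have hcmem : c ∈ taken := by rw [← hjc]; exact List.getElem_mem hjlen
    exact (pvFreeSeq_mem taken c hcmem _).symm
  | case2 c j free hlt hcond ih =>
    intro htake hdrop
    have hcnot : c ∉ taken := by
      intro hc
      rw [← List.take_append_drop j taken, List.mem_append] at hc
      rcases hc with hc | hc
      · have := htake c hc; omega
      · by_cases hjlen : j < taken.length
        · rw [List.drop_eq_getElem_cons hjlen] at hc
          have hpdrop : (taken.drop j).Pairwise (· < ·) := hs.drop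
          rw [List.drop_eq_getElem_cons hjlen] at hpdrop
          rcases List.mem_cons.mp hc with hc | hc
          · exact hcond ⟨hjlen, by rw [getElem!_pos taken j hjlen, ← hc]⟩
          · have h1 := (List.pairwise_cons.mp hpdrop).1 c hc
            have h2 : c ≤ taken[j] := hdrop taken[j] (by
              rw [List.drop_eq_getElem_cons hjlen]; exact List.mem_cons_self)
            omega
        · rw [List.drop_eq_nil_of_le (by omega)] at hc; cases hc
    have hnf : pvNextFree taken c = c := by rw [pvNextFree, dif_neg hcnot]
    rw [ih (fun x hx => by have := htake x hx; omega) (by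
      intro x hx
      have h1 := hdrop x hx
      have h2 : x ≠ c := fun he => hcnot (he ▸ List.mem_of_mem_drop hx)
      omega)]
    have hn : need - free.length = (need - (free ++ [c]).length) + 1 := by
      simp only [List.length_append, List.length_singleton]; omega
    rw [hn]
    simp [pvFreeSeq, hnf]
  | case3 c j free hlt =>
    intro _ _
    have hz : need - free.length = 0 := by omega
    simp [hz, pvFreeSeq]

theorem pvNextFree_congr (S taken : List Int)
    (hmem : ∀ k : Int, 0 ≤ k → (k ∈ S ↔ k ∈ taken)) (i : Int) :
    0 ≤ i → pvNextFree S i = pvNextFree taken i := by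
  fun_induction pvNextFree S i with
  | case1 i h ih =>
    intro hi
    have hrhs : pvNextFree taken i = pvNextFree taken (i + 1) := by
      conv_lhs => rw [pvNextFree]
      rw [dif_pos ((hmem i hi).mp h)]
    rw [hrhs]
    exact ih (by omega)
  | case2 i h =>
    intro hi
    have hrhs : pvNextFree taken i = i := by
      conv_lhs => rw [pvNextFree]
      rw [dif_neg (fun hc => h ((hmem i hi).mpr hc))]
    rw [hrhs]

theorem pvFreeSeq_congr (S taken : List Int)
    (hmem : ∀ k : Int, 0 ≤ k → (k ∈ S ↔ k ∈ taken)) :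
    ∀ (n : Nat) (i : Int), 0 ≤ i → pvFreeSeq S i n = pvFreeSeq taken i n := by
  intro n
  induction n with
  | zero => intro i _; rfl
  | succ m ih =>
    intro i hi
    have hnf := pvNextFree_congr S taken hmem i hi
    have hge := pvNextFree_ge S i
    simp only [pvFreeSeq, hnf]
    rw [ih (pvNextFree taken i + 1) (by rw [← hnf]; omega)]

theorem pvAllocB_eq_zip (S : List Int) :
    ∀ (xs : List String) (i : Int),
    pvAllocB S i xs = ((pvFreeSeq S i xs.length).zip xs).map (fun p => (p.1, [p.2])) := by
  intro xs
  induction xs with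
  | nil => intro i; rfl
  | cons x rest ih =>
    intro i
    simp only [pvAllocB, List.length_cons, pvFreeSeq, List.zip_cons_cons, List.map_cons]
    rw [ih]

theorem pvFreeSeq_sorted_fresh (S : List Int) :
    ∀ (n : Nat) (i : Int),
    (pvFreeSeq S i n).Pairwise (· < ·) ∧ ∀ x ∈ pvFreeSeq S i n, i ≤ x ∧ x ∉ S := by
  intro n
  induction n with
  | zero => intro i; exact ⟨List.Pairwise.nil, by simp [pvFreeSeq]⟩
  | succ m ih =>
    intro i
    obtain ⟨hp, hm⟩ := ih (pvNextFree S i + 1)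
    have hge := pvNextFree_ge S i
    have hnm := pvNextFree_not_mem S i
    refine ⟨List.pairwise_cons.mpr ⟨fun x hx => by have := (hm x hx).1; omega, hp⟩, ?_⟩
    intro x hx
    rcases List.mem_cons.mp hx with hx | hx
    · exact ⟨hx ▸ hge, hx ▸ hnm⟩
    · have := hm x hx; exact ⟨by omega, this.2⟩

theorem pvFreeSeq_length (S : List Int) : ∀ (n : Nat) (i : Int), (pvFreeSeq S i n).length = n := by
  intro n
  induction n with
  | zero => intro i; rfl
  | succ m ih => intro i; simp [pvFreeSeq, ih]

theorem pvFoldlInsert_eq (ps : List (Int × String)) :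
    ∀ (l : List (Int × List String)),
    ps.Pairwise (fun a b => a.1 ≠ b.1) →
    (∀ e ∈ ps, e.1 ∉ l.map (fun p => p.1)) →
    (ps.foldl (fun d p => d.insert p.1 [p.2]) (PySem.Dict.mk l)).items
      = l ++ ps.map (fun p => (p.1, [p.2])) := by
  induction ps with
  | nil => intro l _ _; simp
  | cons e rest ih =>
    intro l hp hf
    have hcon : (PySem.Dict.mk l).contains e.1 = false := by
      rw [← Bool.not_eq_true, PySem.Dict.contains_iff_mem_keys]
      simpa using hf e List.mem_cons_self
    have hins : (PySem.Dict.mk l).insert e.1 [e.2] = PySem.Dict.mk (l ++ [(e.1, [e.2])]) := by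
      apply PySem.Dict.ext
      rw [PySem.Dict.items_insert_of_not_contains _ _ hcon]
    simp only [List.foldl_cons, hins]
    rw [ih (l ++ [(e.1, [e.2])]) (List.pairwise_cons.mp hp).2 (by
      intro x hx
      simp only [List.map_append, List.mem_append]
      rintro (h1 | h2)
      · exact hf x (List.mem_cons_of_mem e hx) h1
      · simp only [List.map_cons, List.map_nil, List.mem_singleton] at h2
        exact (List.pairwise_cons.mp hp).1 x hx h2.symm)]
    simp

-- ===== VERDICT (by name: the statement is the Claim_ definition above) =====
theorem add_to_running_dict_py_spec : Claim_equal_add_to_running_dict_py := by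
  intro od al _
  unfold Spec_add_to_running_dict_py add_to_running_dict_py add_to_running_dict_py_alt
  simp only [PySem.Dict.values_mk]
  -- both filters select the same items
  have hfun : (fun it : String => !(PySem.Set.ofList
        (((od.map (fun p => p.2)).filter (fun v => !v.isEmpty)).map (fun v => v.headI))).contains it)
      = (fun it : String => !(((od.map (fun p => p.2)).filter (fun v => !v.isEmpty)).map (fun v => v.headI)).contains it) := by
    funext x
    have : (PySem.Set.ofList
        (((od.map (fun p => p.2)).filter (fun v => !v.isEmpty)).map (fun v => v.headI))).contains x
      = (((od.map (fun p => p.2)).filter (fun v => !v.isEmpty)).map (fun v => v.headI)).contains x := by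
      simp [List.contains_eq_mem, PySem.Set.mem_ofList]
    rw [this]
  set cur := ((od.map (fun p => p.2)).filter (fun v => !v.isEmpty)).map (fun v => v.headI) with hcur
  set to_add := al.filter (fun it => !cur.contains it) with hta
  set S := PySem.Set.ofList (od.map (fun p => p.1)) with hS
  set taken := PySem.List.sorted
    (PySem.Set.ofList ((od.map (fun p => p.1)).filter (fun k => decide (0 ≤ k))))
    (fun x => x) false with htaken
  -- membership agreement between the full key set and the sorted nonnegative keys
  have hmem : ∀ k : Int, 0 ≤ k → (k ∈ S ↔ k ∈ taken) := by
    intro k hk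
    rw [hS, htaken, PySem.Set.mem_ofList, PySem.List.mem_sorted, PySem.Set.mem_ofList,
      List.mem_filter]
    simp [hk]
  -- A's result via the reference allocation
  have hA := pvLoopA_eq cur od al [] 0 (by simp)
  simp only [List.append_nil] at hA
  rw [hA, hfun, ← hta, ← hS]
  rw [pvAllocB_eq_zip S to_add 0, pvFreeSeq_congr S taken hmem to_add.length 0 le_rfl]
  -- B's result via the fold-of-inserts lemma
  have hsorted : taken.Pairwise (· < ·) := by
    rw [htaken]; exact PySem.List.sorted_ofList_pairwise_lt _
  have hfk := pvFreeKeys_eq to_add.length taken 0 0 [] hsorted (by simp)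
    (by intro x hx
        have hx' : x ∈ taken := List.mem_of_mem_drop hx
        rw [htaken, PySem.List.mem_sorted, PySem.Set.mem_ofList, List.mem_filter] at hx'
        simpa using hx'.2)
  simp only [List.length_nil, Nat.sub_zero, List.nil_append] at hfk
  rw [hfk]
  set free := pvFreeSeq taken 0 to_add.length with hfree
  obtain ⟨hfp, hfm⟩ := pvFreeSeq_sorted_fresh taken to_add.length 0
  have hflen : free.length = to_add.length := pvFreeSeq_length taken to_add.length 0
  rw [pvFoldlInsert_eq (free.zip to_add) od
    (by
      have : (free.zip to_add).Pairwise (fun a b => a.1 < b.1) := by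
        have hmapf : ((free.zip to_add).map (fun p => p.1)).Pairwise (· < ·) := by
          rw [List.map_fst_zip (le_of_eq hflen)]
          exact hfp
        exact (List.pairwise_map.mp hmapf)
      exact this.imp (fun h => by omega))
    (by
      intro e he
      obtain ⟨h1, _⟩ := List.of_mem_zip he
      obtain ⟨hge0, hnot⟩ := hfm e.1 h1
      intro hc
      exact hnot ((hmem e.1 hge0).mp (by rw [hS, PySem.Set.mem_ofList]; exact hc)))]
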